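-- pv_equiv track=rewrite | github.com/xyzjhe/p115client | p115client/tool/util.py | determine_part_size
-- ===== SOURCE A (Python) =====
-- def determine_part_size(
--     size: int,
--     min_part_size: int = 1024 * 1024 * 10,
--     max_part_count: int = 10 ** 4,
-- ) -> int:
--     """确定分片上传（multipart upload）时的分片大小
--
--     :param size: 数据大小
--     :param min_part_size:  用户期望的分片大小
--     :param max_part_count: 最大的分片个数
--
--     :return: 分片大小
--     """
--     if size <= min_part_size:
--         return size
--     n = -(-size // max_part_count)
--     part_size = min_part_size
--     while part_size < n:
--         part_size <<= 1
--     return part_size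
-- ===== SOURCE B (Python) =====
-- def determine_part_size(
--     size: int,
--     min_part_size: int = 1024 * 1024 * 10,
--     max_part_count: int = 10 ** 4,
-- ) -> int:
--     if size <= min_part_size:
--         return size
--     n = -(-size // max_part_count)
--     if n <= min_part_size:
--         return min_part_size
--     r = -(-n // min_part_size)          # ceil(n / min_part_size), >= 2 here
--     return min_part_size << (r - 1).bit_length()
-- ===== Notes on version B (the rewrite author's own statement) =====
-- stated objective: alternative
-- what changed: Replaced the doubling while-loop with a closed-form computation: the smallest power-of-two multiple of min_part_size reaching ceil(size/max_part_count) is obtained by one ceiling division and (r-1).bit_length(), no loop.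
import Mathlib
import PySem

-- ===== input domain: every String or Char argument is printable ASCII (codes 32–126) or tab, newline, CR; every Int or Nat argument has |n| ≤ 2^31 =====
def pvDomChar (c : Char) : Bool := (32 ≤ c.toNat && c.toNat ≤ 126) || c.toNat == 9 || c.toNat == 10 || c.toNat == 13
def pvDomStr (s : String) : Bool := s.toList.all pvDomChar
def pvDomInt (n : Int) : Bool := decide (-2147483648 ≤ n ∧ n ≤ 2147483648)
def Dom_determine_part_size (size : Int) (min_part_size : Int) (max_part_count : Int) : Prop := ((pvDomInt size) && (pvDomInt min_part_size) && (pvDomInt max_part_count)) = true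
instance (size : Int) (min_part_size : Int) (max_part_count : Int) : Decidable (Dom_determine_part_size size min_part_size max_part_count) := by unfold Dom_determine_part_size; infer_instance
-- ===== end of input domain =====

-- B replaces A's doubling while-loop by a closed-form bit_length computation (loop-free; same return value).


-- ===== PORT A =====
-- the 'while part_size < n: part_size <<= 1' loop; fuel 64 suffices on Dom ∩ Pre_ (proved below)
def dpsLoop : Nat → Int → Int → Int
  | 0, part, _ => part
  | f + 1, part, n => if part < n then dpsLoop f (part * 2) n else part

def determine_part_size (size : Int) (min_part_size : Int) (max_part_count : Int) : Int :=
  if size ≤ min_part_size then size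
  else
    let n := -(PySem.Int.floordiv (-size) max_part_count)
    dpsLoop 64 min_part_size n

-- ===== PORT B =====
def determine_part_size_alt (size : Int) (min_part_size : Int) (max_part_count : Int) : Int :=
  if size ≤ min_part_size then size
  else
    let n := -(PySem.Int.floordiv (-size) max_part_count)
    if n ≤ min_part_size then min_part_size
    else
      let r := -(PySem.Int.floordiv (-n) min_part_size)
      min_part_size * 2 ^ PySem.Int.bitLength (r - 1)

-- ===== PRECONDITION & SPEC =====
-- Pre_ excludes exactly the inputs where A does not return: max_part_count = 0 with size > min_part_size
-- (ZeroDivisionError), and min_part_size ≤ 0 with the ceiling target -(-size // max_part_count) above it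
-- (the doubling loop then never terminates). A returns on every input admitted here.
def Pre_determine_part_size (size : Int) (min_part_size : Int) (max_part_count : Int) : Prop :=
  size ≤ min_part_size ∨
    (max_part_count ≠ 0 ∧
      (0 < min_part_size ∨ -(PySem.Int.floordiv (-size) max_part_count) ≤ min_part_size))
instance (size : Int) (min_part_size : Int) (max_part_count : Int) : Decidable (Pre_determine_part_size size min_part_size max_part_count) := by unfold Pre_determine_part_size; infer_instance

def pvWitness_determine_part_size : Int × Int × Int := (1000, 16, 10)

def Spec_determine_part_size (size : Int) (min_part_size : Int) (max_part_count : Int) (out : Int) : Prop := out = determine_part_size_alt size min_part_size max_part_count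
instance (size : Int) (min_part_size : Int) (max_part_count : Int) (out : Int) : Decidable (Spec_determine_part_size size min_part_size max_part_count out) := by unfold Spec_determine_part_size; infer_instance

-- ===== CLAIM (what is proved, stated in full; the proofs are below) =====
def Claim_equal_determine_part_size : Prop := ∀ (size : Int) (min_part_size : Int) (max_part_count : Int), Dom_determine_part_size size min_part_size max_part_count → Pre_determine_part_size size min_part_size max_part_count → Spec_determine_part_size size min_part_size max_part_count (determine_part_size size min_part_size max_part_count)

-- ===== LEMMAS AND PROOFS =====

-- A's loop result: a power-of-two multiple of part that reaches n, with the previous one below n.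
lemma dpsLoop_spec (f : Nat) (part n : Int) (hp : 1 ≤ part) (hf : n ≤ part * 2 ^ f) :
    ∃ k : Nat, dpsLoop f part n = part * 2 ^ k ∧ n ≤ part * 2 ^ k ∧
      (k = 0 ∨ part * 2 ^ (k - 1) < n) := by
  induction f generalizing part with
  | zero =>
    refine ⟨0, by simp [dpsLoop], by simpa using hf, Or.inl rfl⟩
  | succ f ih =>
    by_cases h : part < n
    · have hp2 : 1 ≤ part * 2 := by nlinarith
      have hf2 : n ≤ part * 2 * 2 ^ f := by
        have : part * 2 ^ (f + 1) = part * 2 * 2 ^ f := by ring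
        omega
      obtain ⟨k, hk, hle, hmin⟩ := ih (part * 2) hp2 hf2
      refine ⟨k + 1, ?_, ?_, Or.inr ?_⟩
      · simp only [dpsLoop, if_pos h, hk]; ring
      · have : part * 2 * 2 ^ k = part * 2 ^ (k + 1) := by ring
        omega
      · rcases hmin with h0 | hlt
        · subst h0; simpa using h
        · have hk1 : 1 ≤ k := by
            by_contra hk0
            have hk0' : k = 0 := by omega
            subst hk0'; simp at hlt; omega
          have heq : part * 2 * 2 ^ (k - 1) = part * 2 ^ (k + 1 - 1) := by
            rw [show k + 1 - 1 = (k - 1) + 1 by omega, pow_succ]; ring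
          omega
    · exact ⟨0, by simp [dpsLoop, h], by simpa using not_lt.mp h, Or.inl rfl⟩

-- uniqueness of such an exponent
lemma pow_exp_unique (part n : Int) (hp : 1 ≤ part) (a b : Nat)
    (ha1 : n ≤ part * 2 ^ a) (ha2 : a = 0 ∨ part * 2 ^ (a - 1) < n)
    (hb1 : n ≤ part * 2 ^ b) (hb2 : b = 0 ∨ part * 2 ^ (b - 1) < n) : a = b := by
  by_contra hne
  rcases Nat.lt_or_ge a b with h | h
  · rcases hb2 with h0 | hlt
    · omega
    · have hle : (2 : Int) ^ a ≤ 2 ^ (b - 1) := by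
        apply pow_le_pow_right₀ (by norm_num); omega
      nlinarith
  · have h' : b < a := by omega
    rcases ha2 with h0 | hlt
    · omega
    · have hle : (2 : Int) ^ b ≤ 2 ^ (a - 1) := by
        apply pow_le_pow_right₀ (by norm_num); omega
      nlinarith

-- ceiling bracket: with 0 < b, r = -((-a)//b) satisfies (r-1)*b < a ≤ r*b
lemma ceil_bracket (a b : Int) (hb : 0 < b) :
    (-(PySem.Int.floordiv (-a) b) - 1) * b < a ∧ a ≤ -(PySem.Int.floordiv (-a) b) * b := by
  have := (PySem.Int.neg_floordiv_neg_eq_iff_of_pos (a := a) (b := b)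
    (q := -(PySem.Int.floordiv (-a) b)) hb).mp rfl
  exact ⟨this.1, this.2⟩

-- |a // b| ≤ |a| + 1 (loose bound, enough for the fuel argument)
lemma floordiv_abs_le (a b : Int) :
    (PySem.Int.floordiv a b).natAbs ≤ a.natAbs + 1 := by
  have h : PySem.Int.floordiv a b = a / b - if 0 ≤ b ∨ b ∣ a then 0 else 1 := Int.fdiv_eq_ediv
  have h2 := Int.natAbs_ediv_le_natAbs a b
  split at h <;> omega

-- B's exponent satisfies the same bracket as A's loop result (case n > min_part_size ≥ 1)
lemma alt_exp_spec (m n : Int) (hm : 1 ≤ m) (hn : m < n) :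
    n ≤ m * 2 ^ PySem.Int.bitLength (-(PySem.Int.floordiv (-n) m) - 1) ∧
      m * 2 ^ (PySem.Int.bitLength (-(PySem.Int.floordiv (-n) m) - 1) - 1) < n := by
  set r : Int := -(PySem.Int.floordiv (-n) m) with hr
  obtain ⟨hlo, hhi⟩ := ceil_bracket n m (by omega)
  have hr2 : 2 ≤ r := by nlinarith
  have habs : (r - 1).natAbs = (r - 1).toNat := by omega
  set k : Nat := PySem.Int.bitLength (r - 1) with hk
  have hub : (r - 1).natAbs < 2 ^ k := PySem.Int.lt_two_pow_bitLength (r - 1)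
  have hlb : 2 ^ (k - 1) ≤ (r - 1).natAbs := PySem.Int.two_pow_bitLength_le (r - 1) (by omega)
  have hcast : ((2 ^ k : Nat) : Int) = (2 : Int) ^ k := by push_cast; ring
  have hcast' : ((2 ^ (k - 1) : Nat) : Int) = (2 : Int) ^ (k - 1) := by push_cast; ring
  have hubZ : r - 1 < (2 : Int) ^ k := by
    have h2 : ((r - 1).natAbs : Int) < ((2 ^ k : Nat) : Int) := by exact_mod_cast hub
    rw [hcast] at h2; omega
  have hlbZ : (2 : Int) ^ (k - 1) ≤ r - 1 := by
    have h2 : ((2 ^ (k - 1) : Nat) : Int) ≤ ((r - 1).natAbs : Int) := by exact_mod_cast hlb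
    rw [hcast'] at h2; omega
  constructor
  · -- n ≤ m * 2^k : since r ≤ 2^k and n ≤ r*m
    have hrk : r ≤ 2 ^ k := by omega
    nlinarith
  · -- m * 2^(k-1) < n : since 2^(k-1) ≤ r-1 and (r-1)*m < n
    nlinarith

-- ===== VERDICT (by name: the statement is the Claim_ definition above) =====
theorem determine_part_size_spec : Claim_equal_determine_part_size := by
  intro size m mpc hdom hpre
  unfold Spec_determine_part_size determine_part_size determine_part_size_alt
  by_cases hs : size ≤ m
  · simp [hs]
  · simp only [if_neg hs]
    set n : Int := -(PySem.Int.floordiv (-size) mpc) with hn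
    by_cases hnm : n ≤ m
    · -- loop body never runs
      simp only [if_pos hnm]
      show dpsLoop 64 m n = m
      simp [dpsLoop, not_lt.mpr hnm]
    · simp only [if_neg hnm]
      -- here Pre_ forces mpc ≠ 0 and 1 ≤ m
      have hmpc : mpc ≠ 0 := by
        rcases hpre with h | ⟨h, _⟩; · omega
        · exact h
      have hm1 : 1 ≤ m := by
        rcases hpre with h | ⟨_, h | h⟩
        · omega
        · omega
        · omega
      have hmn : m < n := by omega
      -- fuel bound: n ≤ m * 2^64
      have hbound : n ≤ m * 2 ^ 64 := by
        have h1 : (PySem.Int.floordiv (-size) mpc).natAbs ≤ (-size).natAbs + 1 :=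
          floordiv_abs_le (-size) mpc
        have hdom' : size ≤ 2147483648 ∧ -2147483648 ≤ size := by
          unfold Dom_determine_part_size pvDomInt at hdom
          simp only [Bool.and_eq_true, decide_eq_true_eq] at hdom
          exact ⟨hdom.1.1.2, hdom.1.1.1⟩
        have h2 : n ≤ (2147483649 : Int) := by
          have := h1
          omega
        have h3 : (2147483649 : Int) ≤ 1 * 2 ^ 64 := by norm_num
        nlinarith
      obtain ⟨a, hloop, ha1, ha2⟩ := dpsLoop_spec 64 m n hm1 hbound
      obtain ⟨hb1, hb2⟩ := alt_exp_spec m n hm1 hmn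
      set k : Nat := PySem.Int.bitLength (-(PySem.Int.floordiv (-n) m) - 1) with hkdef
      have hb2' : k = 0 ∨ m * 2 ^ (k - 1) < n := Or.inr hb2
      have := pow_exp_unique m n hm1 a k ha1 ha2 hb1 hb2'
      rw [hloop, this]
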